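-- pv_equiv track=rewrite | github.com/DilyanTsenkov/SoftUni-Software-Engineering | Python Fundamentals/08 Text Processing/Exercises/10_winning_ticket.py | winner_searcher
-- ===== SOURCE A (Python) =====
-- def winner_searcher(part, win_symbol):
--     counter = 0
--     symbol_counter = 0
--     p_symbol = ""
--     symbol = ""
--     for n in range(10):
--         current_symbol = part[n]
--         if current_symbol == p_symbol and current_symbol in win_symbol:
--             counter += 1
--             if counter >= 6:
--                 symbol = current_symbol
--                 symbol_counter = counter
--         elif current_symbol in win_symbol:
--             p_symbol = current_symbol
--             counter = 1
--         else:
--             counter = 0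
--             p_symbol = current_symbol
--     return symbol, symbol_counter
-- ===== SOURCE B (Python) =====
-- def winner_searcher(part, win_symbol):
--     chars = [part[n] for n in range(10)]
--     runs = []
--     for c in chars:
--         if runs and runs[-1][0] == c:
--             runs[-1] = (runs[-1][0], runs[-1][1] + 1)
--         else:
--             runs.append((c, 1))
--     symbol, symbol_counter = "", 0
--     for c, length in runs:
--         if c in win_symbol and length >= 6:
--             symbol, symbol_counter = c, length
--     return symbol, symbol_counter
-- ===== Notes on version B (the rewrite author's own statement) =====
-- stated objective: alternative
-- what changed: A interleaves a running counter/p_symbol with in-loop recording of the winning symbol; B first run-length-encodes the first 10 characters and then selects the last run whose symbol is winning and whose length is >= 6 (group-then-select).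
import Mathlib
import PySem

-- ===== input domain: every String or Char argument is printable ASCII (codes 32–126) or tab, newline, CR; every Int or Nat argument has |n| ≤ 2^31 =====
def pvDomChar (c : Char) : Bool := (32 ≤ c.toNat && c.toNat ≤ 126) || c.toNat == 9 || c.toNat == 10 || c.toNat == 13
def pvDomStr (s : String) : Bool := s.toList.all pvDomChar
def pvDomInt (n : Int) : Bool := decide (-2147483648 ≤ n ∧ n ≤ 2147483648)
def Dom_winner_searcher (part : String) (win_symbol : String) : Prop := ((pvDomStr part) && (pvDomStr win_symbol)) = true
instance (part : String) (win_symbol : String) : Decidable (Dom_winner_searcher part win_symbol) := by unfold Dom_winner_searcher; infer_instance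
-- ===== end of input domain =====

-- B replaces A's interleaved counter/p_symbol/record state by a group-then-select pass
-- (run-length encode the 10 characters, then pick the last winning run of length ≥ 6);
-- same return value on every part of length ≥ 10 (A raises IndexError on shorter parts).

-- part[n] as a 1-character string; the `none` case is an IndexError, excluded by Pre_
-- (the "" placeholder there is never reached inside Pre_).
def pvCur (part : String) (n : Int) : String :=
  match PySem.Str.pyGet? part n with
  | some ch => String.ofList [ch]
  | none => ""

-- `c in win_symbol` (substring membership; exact via PySem.Str.isIn)
def pvMem (win_symbol : String) (c : String) : Bool := PySem.Str.isIn c win_symbol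

-- ===== PORT A =====
-- A's loop body; state is (counter, symbol_counter, p_symbol, symbol)
def pvStepA (win_symbol : String) (st : Int × Int × String × String) (c : String) :
    Int × Int × String × String :=
  let counter := st.1
  let symbol_counter := st.2.1
  let p_symbol := st.2.2.1
  let symbol := st.2.2.2
  if c == p_symbol && pvMem win_symbol c then
    let counter := counter + 1
    if 6 ≤ counter then (counter, counter, p_symbol, c)
    else (counter, symbol_counter, p_symbol, symbol)
  else if pvMem win_symbol c then (1, symbol_counter, c, symbol)
  else (0, symbol_counter, c, symbol)

def winner_searcher (part : String) (win_symbol : String) : String × Int :=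
  let st := (PySem.List.pyRange 0 10 1).foldl
    (fun st n => pvStepA win_symbol st (pvCur part n)) (0, 0, "", "")
  (st.2.2.2, st.2.1)

-- ===== PORT B =====
-- Source B's run-building step: extend the last run or start a new one
def pvRunsStep (rs : List (String × Int)) (c : String) : List (String × Int) :=
  match rs.getLast? with
  | some r => if r.1 == c then rs.dropLast ++ [(r.1, r.2 + 1)] else rs ++ [(c, 1)]
  | none => [(c, 1)]

-- Source B's selection step over the runs
def pvSelStep (win_symbol : String) (acc : String × Int) (r : String × Int) : String × Int :=
  if pvMem win_symbol r.1 && decide (6 ≤ r.2) then r else acc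

def winner_searcher_alt (part : String) (win_symbol : String) : String × Int :=
  let chars : List String := (PySem.List.pyRange 0 10 1).map (pvCur part)
  let runs : List (String × Int) := chars.foldl pvRunsStep []
  runs.foldl (pvSelStep win_symbol) ("", 0)

-- ===== PRECONDITION & SPEC =====
-- A indexes part[0..9], so it raises IndexError iff part has fewer than 10 characters.
def Pre_winner_searcher (part : String) (win_symbol : String) : Prop :=
  10 ≤ part.toList.length
instance (part : String) (win_symbol : String) : Decidable (Pre_winner_searcher part win_symbol) := by
  unfold Pre_winner_searcher; infer_instance

def pvWitness_winner_searcher : String × String := ("aaaaaaa@bc", "abc")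

def Spec_winner_searcher (part : String) (win_symbol : String) (out : String × Int) : Prop := out = winner_searcher_alt part win_symbol
instance (part : String) (win_symbol : String) (out : String × Int) : Decidable (Spec_winner_searcher part win_symbol out) := by unfold Spec_winner_searcher; infer_instance

-- ===== CLAIM (what is proved, stated in full; the proofs are below) =====
def Claim_equal_winner_searcher : Prop := ∀ (part : String) (win_symbol : String), Dom_winner_searcher part win_symbol → Pre_winner_searcher part win_symbol → Spec_winner_searcher part win_symbol (winner_searcher part win_symbol)

-- ===== LEMMAS AND PROOFS =====

-- the selection result over a run list
def pvSel (win_symbol : String) (rs : List (String × Int)) : String × Int :=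
  rs.foldl (pvSelStep win_symbol) ("", 0)

lemma pvSel_append (win_symbol : String) (rs : List (String × Int)) (r : String × Int) :
    pvSel win_symbol (rs ++ [r]) = pvSelStep win_symbol (pvSel win_symbol rs) r := by
  simp [pvSel]

-- invariant tying A's loop state to B's runs built so far
def pvInv (win_symbol : String) (rs : List (String × Int))
    (st : Int × Int × String × String) : Prop :=
  st.2.2.2 = (pvSel win_symbol rs).1 ∧ st.2.1 = (pvSel win_symbol rs).2 ∧
  (match rs.getLast? with
   | none => st.1 = 0 ∧ st.2.2.1 = ""
   | some r => st.2.2.1 = r.1 ∧ st.1 = (if pvMem win_symbol r.1 then r.2 else 0))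

lemma pvInv_step (win_symbol : String) (rs : List (String × Int))
    (st : Int × Int × String × String) (c : String) (h : pvInv win_symbol rs st) :
    pvInv win_symbol (pvRunsStep rs c) (pvStepA win_symbol st c) := by
  obtain ⟨k, sc, p, s⟩ := st
  obtain ⟨hs, hsc, hlast⟩ := h
  rcases rs.eq_nil_or_concat with rfl | ⟨xs, r, hrs⟩
  · simp only [List.getLast?_nil] at hlast
    obtain ⟨hk, hp⟩ := hlast
    subst hk hp hs hsc
    simp only [pvRunsStep, pvStepA, List.getLast?_nil, pvInv, pvSel, List.foldl, pvSelStep]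
    by_cases hm : pvMem win_symbol c
    · by_cases he : c == ""
      · simp_all
      · simp_all
    · simp_all
  · obtain ⟨c0, l⟩ := r
    rw [List.concat_eq_append] at hrs
    subst hrs
    simp only [List.getLast?_concat] at hlast
    obtain ⟨hp, hk⟩ := hlast
    subst hp hk hs hsc
    by_cases he : c = p
    · subst he
      simp only [pvRunsStep, List.getLast?_concat, beq_self_eq_true, if_true, List.dropLast_concat,
        pvStepA, Bool.true_and]
      by_cases hm : pvMem win_symbol c
      · simp only [hm, if_true]
        by_cases h6 : (6 : Int) ≤ l + 1
        · have h6' : (6 : Int) ≤ l + 1 := h6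
          simp only [h6, if_pos]
          refine ⟨?_, ?_, ?_⟩ <;>
            simp [pvSel_append, pvSelStep, hm, h6]
        · have h6' : ¬ (6 : Int) ≤ l := by omega
          simp only [h6, if_neg, not_false_iff]
          refine ⟨?_, ?_, ?_⟩ <;>
            simp [pvSel_append, pvSelStep, hm, h6, h6']
      · simp only [hm, Bool.false_eq_true, if_false]
        refine ⟨?_, ?_, ?_⟩ <;>
          simp [pvSel_append, pvSelStep, hm]
    · have hne : (c == p) = false := beq_eq_false_iff_ne.mpr he
      have hne' : (p == c) = false := beq_eq_false_iff_ne.mpr (Ne.symm he)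
      simp only [pvRunsStep, List.getLast?_concat, hne', Bool.false_eq_true, if_false,
        pvStepA, hne, Bool.false_and]
      have hsel : pvSel win_symbol (xs ++ [(p, l), (c, 1)])
          = pvSel win_symbol (xs ++ [(p, l)]) := by
        rw [show xs ++ [(p, l), (c, 1)] = (xs ++ [(p, l)]) ++ [(c, 1)] by simp, pvSel_append]
        simp [pvSelStep]
      by_cases hm : pvMem win_symbol c
      · simp only [hm, if_true]
        refine ⟨?_, ?_, ?_⟩ <;>
          simp [hsel, hm]
      · simp only [hm, Bool.false_eq_true, if_false]
        refine ⟨?_, ?_, ?_⟩ <;>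
          simp [hsel, hm]

lemma pvInv_foldl (win_symbol : String) (ls : List String) :
    ∀ (rs : List (String × Int)) (st : Int × Int × String × String),
    pvInv win_symbol rs st →
    pvInv win_symbol (ls.foldl pvRunsStep rs) (ls.foldl (pvStepA win_symbol) st) := by
  induction ls with
  | nil => intro rs st h; simpa using h
  | cons c ls ih =>
      intro rs st h
      exact ih _ _ (pvInv_step win_symbol rs st c h)

-- the index loop over range(k) reads exactly the first k characters (as 1-char strings)
lemma pvFold_range (part : String) (k : Nat) (hk : k ≤ part.toList.length)
    {σ : Type} (g : σ → String → σ) (init : σ) :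
    (PySem.List.pyRange 0 (k : Int) 1).foldl (fun st n => g st (pvCur part n)) init
    = ((part.toList.take k).map (fun ch => String.ofList [ch])).foldl g init := by
  induction k generalizing init with
  | zero => simp
  | succ k ih =>
      have hk' : k ≤ part.toList.length := Nat.le_of_succ_le hk
      have hlt : k < part.toList.length := hk
      have hr : PySem.List.pyRange 0 ((k : Int) + 1) 1
          = PySem.List.pyRange 0 (k : Int) 1 ++ [(k : Int)] :=
        PySem.List.pyRange_one_succ_right (by positivity)
      have hcast : ((k + 1 : Nat) : Int) = (k : Int) + 1 := by push_cast; ring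
      rw [hcast, hr, List.foldl_append, ih hk']
      have hcur : pvCur part (k : Int) = String.ofList [part.toList[k]] := by
        simp [pvCur, List.getElem?_eq_getElem hlt]
      rw [List.take_add_one, List.getElem?_eq_getElem hlt, List.map_append, List.foldl_append]
      simp [hcur]

lemma pvMap_range (part : String) (k : Nat) (hk : k ≤ part.toList.length) :
    (PySem.List.pyRange 0 (k : Int) 1).map (pvCur part)
    = (part.toList.take k).map (fun ch => String.ofList [ch]) := by
  induction k with
  | zero => simp
  | succ k ih =>
      have hk' : k ≤ part.toList.length := Nat.le_of_succ_le hk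
      have hlt : k < part.toList.length := hk
      have hr : PySem.List.pyRange 0 ((k : Int) + 1) 1
          = PySem.List.pyRange 0 (k : Int) 1 ++ [(k : Int)] :=
        PySem.List.pyRange_one_succ_right (by positivity)
      have hcast : ((k + 1 : Nat) : Int) = (k : Int) + 1 := by push_cast; ring
      rw [hcast, hr, List.map_append, ih hk']
      have hcur : pvCur part (k : Int) = String.ofList [part.toList[k]] := by
        simp [pvCur, List.getElem?_eq_getElem hlt]
      rw [List.take_add_one, List.getElem?_eq_getElem hlt, List.map_append]
      simp [hcur]

-- ===== VERDICT (by name: the statement is the Claim_ definition above) =====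
theorem winner_searcher_spec : Claim_equal_winner_searcher := by
  intro part win_symbol _ hpre
  unfold Spec_winner_searcher
  dsimp only [winner_searcher, winner_searcher_alt]
  have h10 : (10 : Nat) ≤ part.toList.length := hpre
  have hA := pvFold_range part 10 h10 (pvStepA win_symbol) (0, 0, "", "")
  have hB := pvMap_range part 10 h10
  simp only [Nat.cast_ofNat] at hA hB
  rw [hA, hB]
  set ls := (part.toList.take 10).map (fun ch => String.ofList [ch]) with hls
  have hinv := pvInv_foldl win_symbol ls [] (0, 0, "", "")
    (by simp [pvInv, pvSel])
  obtain ⟨hs, hsc, -⟩ := hinv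
  rw [hs, hsc]
  rfl
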